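-- pv_equiv track=rewrite | github.com/NathanDai5287/BARD | process_slices.py | ensure_length
-- ===== SOURCE A (Python) =====
-- slices = [1, 6, 12, 36, 60, 90, 119, 138, 154, 172, 227, 242, 263, 282, 307, 344, 398, 469, 508, 525, 552, 578, 622, 669, 711, 740, 795, 848, 862, 919, 973, 1006, 1050, 1086, 1177, 1238, 1318, 1379, 1420, 1457, 1496, 1560, 1630, 1680, 1758, 1796, 1864, 1910, 1951, 1998, 2056, 2109, 2188, 2225, 2266, 2335]
--
-- SHORTEST = 100
--
-- def ensure_length(slices: list[int], shortest=SHORTEST):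
-- 	start = 0
-- 	while (start < len(slices) - 1):
-- 		end = start + 1
-- 		while (end < len(slices) and (slices[end] - slices[start]) < shortest):
-- 			end += 1
-- 		del slices[start + 1:end]
-- 		start += 1
--
-- 	if (len(slices) > 1 and (slices[-1] - slices[-2]) < shortest):
-- 		del slices[-1]
--
-- 	return slices
-- ===== SOURCE B (Python) =====
-- SHORTEST = 100
--
-- def ensure_length(slices: list[int], shortest=SHORTEST):
-- 	# Single pass: keep the first boundary, then every boundary at least
-- 	# `shortest` past the last kept one.  Mutates `slices` in place like A.
-- 	if not slices:
-- 		return slices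
-- 	kept = [slices[0]]
-- 	for x in slices[1:]:
-- 		if x - kept[-1] >= shortest:
-- 			kept.append(x)
-- 	slices[:] = kept
-- 	return slices
-- ===== Notes on version B (the rewrite author's own statement) =====
-- stated objective: faster
-- what changed: Replaces A's nested while-loops with repeated slice deletion (quadratic data movement) by a single forward pass that keeps a boundary iff it is at least `shortest` past the last kept one.
import Mathlib
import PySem

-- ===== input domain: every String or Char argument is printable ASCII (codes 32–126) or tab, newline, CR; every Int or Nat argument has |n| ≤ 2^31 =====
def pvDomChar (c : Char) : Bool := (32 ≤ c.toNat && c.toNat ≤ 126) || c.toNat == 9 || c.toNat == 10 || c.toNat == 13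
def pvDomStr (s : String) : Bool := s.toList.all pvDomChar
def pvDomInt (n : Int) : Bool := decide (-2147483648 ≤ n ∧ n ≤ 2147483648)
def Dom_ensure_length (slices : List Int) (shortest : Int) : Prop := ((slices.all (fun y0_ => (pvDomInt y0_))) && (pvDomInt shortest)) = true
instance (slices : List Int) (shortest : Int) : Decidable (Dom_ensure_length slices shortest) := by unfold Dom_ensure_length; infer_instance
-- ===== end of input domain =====

-- B replaces A's nested while loops + slice deletions by one linear greedy pass;
-- both Pythons mutate `slices` in place, the theorems are about the returned value.

-- ===== PORT A =====
-- inner while loop: advance `end` while in range and the gap is < shortest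
-- (the guard keeps the index nonnegative and in range, so `getD _ 0` is exact here)
def ensureInner (slices : List Int) (start : Nat) (shortest : Int) (e : Nat) : Nat :=
  if h : e < slices.length ∧ slices.getD e 0 - slices.getD start 0 < shortest then
    ensureInner slices start shortest (e + 1)
  else e
termination_by slices.length - e
decreasing_by omega

-- needed by the termination proof of the outer loop
theorem ensureInner_ge (slices : List Int) (start : Nat) (shortest : Int) (e : Nat) :
    e ≤ ensureInner slices start shortest e := by
  fun_induction ensureInner with
  | case1 e h ih => omega
  | case2 => omega

-- outer while loop; `del slices[start+1:end]` is `take (start+1) ++ drop end`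
def ensureOuter (slices : List Int) (shortest : Int) (start : Nat) : List Int :=
  if h : start + 1 < slices.length then
    ensureOuter (slices.take (start + 1) ++ slices.drop (ensureInner slices start shortest (start + 1)))
      shortest (start + 1)
  else slices
termination_by slices.length - start
decreasing_by
  have := ensureInner_ge slices start shortest (start + 1)
  simp only [List.length_append, List.length_take, List.length_drop]
  omega

-- `len > 1` guards the negative indices -1/-2, so `getD _ 0` is exact in the final fixup
def ensure_length (slices : List Int) (shortest : Int) : List Int :=
  let r := ensureOuter slices shortest 0
  if 1 < r.length ∧ r.getD (r.length - 1) 0 - r.getD (r.length - 2) 0 < shortest then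
    r.dropLast
  else r

-- ===== PORT B =====
-- single pass: keep a boundary iff it is ≥ shortest past the last kept one
def ensure_length_alt (slices : List Int) (shortest : Int) : List Int :=
  match slices with
  | [] => slices
  | h :: t =>
    t.foldl (fun kept x => if shortest ≤ x - kept.getLastD 0 then kept ++ [x] else kept) [h]

-- ===== PRECONDITION & SPEC =====
def Spec_ensure_length (slices : List Int) (shortest : Int) (out : List Int) : Prop := out = ensure_length_alt slices shortest
instance (slices : List Int) (shortest : Int) (out : List Int) : Decidable (Spec_ensure_length slices shortest out) := by unfold Spec_ensure_length; infer_instance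

-- ===== CLAIM (what is proved, stated in full; the proofs are below) =====
def Claim_equal_ensure_length : Prop := ∀ (slices : List Int) (shortest : Int), Dom_ensure_length slices shortest → Spec_ensure_length slices shortest (ensure_length slices shortest)

-- ===== LEMMAS AND PROOFS =====

-- the common greedy skeleton both ports are reduced to
def greedy (sh a : Int) : List Int → List Int
  | [] => []
  | x :: xs => if sh ≤ x - a then x :: greedy sh x xs else greedy sh a xs

theorem ensureInner_drop (slices : List Int) (start : Nat) (sh : Int) (e : Nat) :
    slices.drop (ensureInner slices start sh e) =
      (slices.drop e).dropWhile (fun x => decide (x - slices.getD start 0 < sh)) := by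
  fun_induction ensureInner with
  | case1 e h ih =>
      have hg : slices.getD e 0 = slices[e] := List.getD_eq_getElem _ _ h.1
      have hp : slices[e] - slices.getD start 0 < sh := by rw [← hg]; exact h.2
      rw [ih, List.drop_eq_getElem_cons h.1, List.dropWhile_cons, if_pos (decide_eq_true hp)]
  | case2 e h =>
      by_cases he : e < slices.length
      · have hc : ¬ slices.getD e 0 - slices.getD start 0 < sh := by tauto
        have hg : slices.getD e 0 = slices[e] := List.getD_eq_getElem _ _ he
        have hp : ¬ slices[e] - slices.getD start 0 < sh := by rw [← hg]; exact hc
        rw [List.drop_eq_getElem_cons he, List.dropWhile_cons, if_neg (by simpa using hp)]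
      · rw [List.drop_eq_nil_of_le (by omega)]; simp

theorem greedy_dropWhile (sh a : Int) (xs : List Int) :
    greedy sh a xs =
      match xs.dropWhile (fun x => decide (x - a < sh)) with
      | [] => []
      | y :: ys => y :: greedy sh y ys := by
  induction xs generalizing a with
  | nil => simp [greedy]
  | cons x xs ih =>
      by_cases h : sh ≤ x - a
      · have : ¬ (x - a < sh) := by omega
        simp [greedy, this, h]
      · have : x - a < sh := by omega
        simp [greedy, this, h, ih a]

theorem take_append_cons (t : List Int) (y : Int) (ys : List Int) :
    (t ++ y :: ys).take (t.length + 1) = t ++ [y] ∧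
    (t ++ y :: ys).getD t.length 0 = y ∧
    (t ++ y :: ys).drop (t.length + 1) = ys := by
  refine ⟨?_, ?_, ?_⟩
  · rw [List.take_append, List.take_of_length_le (by omega)]
    simp
  · rw [List.getD_eq_getElem _ _ (by simp)]
    simp
  · rw [List.drop_append, List.drop_eq_nil_of_le (by omega)]
    simp

theorem ensureOuter_char (sh : Int) :
    ∀ n (slices : List Int) (start : Nat), slices.length ≤ start + n → start < slices.length →
      ensureOuter slices sh start =
        slices.take (start + 1) ++ greedy sh (slices.getD start 0) (slices.drop (start + 1)) := by
  intro n
  induction n with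
  | zero => intro slices start h1 h2; omega
  | succ n ih =>
      intro slices start h1 h2
      by_cases hg : start + 1 < slices.length
      · rw [ensureOuter, dif_pos hg]
        set a := slices.getD start 0 with ha
        have hdrop := ensureInner_drop slices start sh (start + 1)
        set e := ensureInner slices start sh (start + 1) with he
        set t := slices.take (start + 1) with ht
        have htl : t.length = start + 1 := by simp [ht]; omega
        rw [greedy_dropWhile]
        cases hdw : (slices.drop (start + 1)).dropWhile (fun x => decide (x - a < sh)) with
        | nil =>
            rw [hdrop.trans hdw]
            rw [ensureOuter, dif_neg (by simp [htl])]
        | cons y ys =>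
            rw [hdrop.trans hdw]
            obtain ⟨h3, h4, h5⟩ := take_append_cons t y ys
            have h6 : slices.length - e = ys.length + 1 := by
              have := congrArg List.length (hdrop.trans hdw); simpa using this
            have hie := ensureInner_ge slices start sh (start + 1)
            have hlen : start + 1 < (t ++ y :: ys).length := by simp [htl]
            rw [ih (t ++ y :: ys) (start + 1) (by simp [htl]; omega) hlen]
            have hst : start + 1 = t.length := htl.symm
            rw [hst, h3, h4, h5]
            simp
      · have hlen : slices.length = start + 1 := by omega
        rw [ensureOuter, dif_neg hg]
        rw [List.take_of_length_le (by omega), List.drop_eq_nil_of_le (by omega)]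
        simp [greedy]

theorem greedy_chain (sh : Int) : ∀ (xs : List Int) (a : Int),
    List.IsChain (fun u v => sh ≤ v - u) (a :: greedy sh a xs) := by
  intro xs
  induction xs with
  | nil => intro a; exact List.isChain_singleton a
  | cons x xs ih =>
      intro a
      by_cases h : sh ≤ x - a
      · simp only [greedy, if_pos h]
        exact List.isChain_cons_cons.mpr ⟨h, ih x⟩
      · simp only [greedy, if_neg h]
        exact ih a

theorem chain_last (R : Int → Int → Prop) :
    ∀ (l : List Int), List.IsChain R l → 1 < l.length →
      R (l.getD (l.length - 2) 0) (l.getD (l.length - 1) 0) := by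
  intro l
  induction l with
  | nil => intro _ h; simp at h
  | cons x l ih =>
      intro hc hl
      cases l with
      | nil => simp at hl
      | cons y r =>
          cases r with
          | nil => exact (List.isChain_cons_cons.mp hc).1
          | cons z r =>
              have := ih (List.isChain_cons_cons.mp hc).2 (by simp)
              simpa [List.getD_cons_succ, Nat.sub_add_comm] using this

theorem getLastD_irrel (b : Int) (bs : List Int) : ∀ (d d' : Int),
    (b :: bs).getLastD d = (b :: bs).getLastD d' := by
  induction bs generalizing b with
  | nil => intro d d'; rfl
  | cons c cs ih => intro d d'; simp only [List.getLastD_cons]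

theorem getLastD_append_cons (pre : List Int) (b : Int) (bs : List Int) : ∀ (d d' : Int),
    (pre ++ b :: bs).getLastD d = (b :: bs).getLastD d' := by
  induction pre with
  | nil => intro d d'; rw [List.nil_append]; exact getLastD_irrel b bs d d'
  | cons p ps ihp =>
      intro d d'
      rw [List.cons_append, List.getLastD_cons]
      exact ihp p d'

theorem foldl_pre (sh : Int) : ∀ (xs pre acc : List Int), acc ≠ [] →
    xs.foldl (fun kept x => if sh ≤ x - kept.getLastD 0 then kept ++ [x] else kept) (pre ++ acc) =
      pre ++ xs.foldl (fun kept x => if sh ≤ x - kept.getLastD 0 then kept ++ [x] else kept) acc := by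
  intro xs
  induction xs with
  | nil => intros; simp
  | cons x xs ih =>
      intro pre acc hacc
      have hlast : (pre ++ acc).getLastD 0 = acc.getLastD 0 := by
        cases acc with
        | nil => exact absurd rfl hacc
        | cons b bs => exact getLastD_append_cons pre b bs 0 0
      simp only [List.foldl_cons, hlast]
      by_cases h : sh ≤ x - acc.getLastD 0
      · rw [if_pos h, if_pos h, List.append_assoc]
        exact ih pre (acc ++ [x]) (by simp)
      · rw [if_neg h, if_neg h]
        exact ih pre acc hacc

theorem foldl_greedy (sh : Int) : ∀ (xs : List Int) (a : Int),
    xs.foldl (fun kept x => if sh ≤ x - kept.getLastD 0 then kept ++ [x] else kept) [a] =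
      a :: greedy sh a xs := by
  intro xs
  induction xs with
  | nil => intro a; simp [greedy]
  | cons x xs ih =>
      intro a
      show xs.foldl (fun kept x => if sh ≤ x - kept.getLastD 0 then kept ++ [x] else kept)
          (if sh ≤ x - a then [a] ++ [x] else [a]) = a :: greedy sh a (x :: xs)
      have hgr : greedy sh a (x :: xs) = if sh ≤ x - a then x :: greedy sh x xs else greedy sh a xs := rfl
      by_cases h : sh ≤ x - a
      · rw [if_pos h, foldl_pre sh xs [a] [x] (by simp), ih x, hgr, if_pos h]
        rfl
      · rw [if_neg h, ih a, hgr, if_neg h]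

-- ===== VERDICT (by name: the statement is the Claim_ definition above) =====
theorem ensure_length_spec : Claim_equal_ensure_length := by
  intro slices shortest _dom
  unfold Spec_ensure_length
  cases slices with
  | nil =>
      have h0 : ensureOuter [] shortest 0 = [] := by rw [ensureOuter]; simp
      simp [ensure_length, ensure_length_alt, h0]
  | cons h t =>
      have hchar := ensureOuter_char shortest (h :: t).length (h :: t) 0 (by omega) (by simp)
      have hr : ensureOuter (h :: t) shortest 0 = h :: greedy shortest h t := by
        simpa using hchar
      have hchain := greedy_chain shortest t h
      have halt : ensure_length_alt (h :: t) shortest = h :: greedy shortest h t := by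
        rw [show ensure_length_alt (h :: t) shortest = t.foldl (fun kept x => if shortest ≤ x - kept.getLastD 0 then kept ++ [x] else kept) [h] from rfl]
        exact foldl_greedy shortest t h
      unfold ensure_length
      rw [hr]
      set g := greedy shortest h t with hg
      by_cases hlen : 1 < (h :: g).length
      · have hlast := chain_last (fun u v => shortest ≤ v - u) (h :: g) hchain hlen
        have : ¬ ((h :: g).getD ((h :: g).length - 1) 0 - (h :: g).getD ((h :: g).length - 2) 0 < shortest) := by omega
        rw [if_neg (by tauto)]
        rw [halt]
      · rw [if_neg (by tauto)]
        rw [halt]
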